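-- pv_equiv track=rewrite | github.com/vigusmao/vigusmao.github.io | bobs_cooler/intersection.py | intersection_n
-- ===== SOURCE A (Python) =====
-- def intersection_n(list1, list2):
--     count = 0
--     element_set = set()
--     for element in list1:
--         element_set.add(element)
--     for candidate in list2:
--         if candidate in element_set:
--             count += 1
--     return count
-- ===== SOURCE B (Python) =====
-- def intersection_n(list1, list2):
--     freq = {}
--     for x in list2:
--         freq[x] = freq.get(x, 0) + 1
--     lookup = set(list1)
--     return sum(c for k, c in freq.items() if k in lookup)
-- ===== Notes on version B (the rewrite author's own statement) =====
-- stated objective: alternative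
-- what changed: B builds a frequency table of list2 once and sums the multiplicities of the distinct keys that occur in set(list1), instead of testing every list2 element one by one.
import Mathlib
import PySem

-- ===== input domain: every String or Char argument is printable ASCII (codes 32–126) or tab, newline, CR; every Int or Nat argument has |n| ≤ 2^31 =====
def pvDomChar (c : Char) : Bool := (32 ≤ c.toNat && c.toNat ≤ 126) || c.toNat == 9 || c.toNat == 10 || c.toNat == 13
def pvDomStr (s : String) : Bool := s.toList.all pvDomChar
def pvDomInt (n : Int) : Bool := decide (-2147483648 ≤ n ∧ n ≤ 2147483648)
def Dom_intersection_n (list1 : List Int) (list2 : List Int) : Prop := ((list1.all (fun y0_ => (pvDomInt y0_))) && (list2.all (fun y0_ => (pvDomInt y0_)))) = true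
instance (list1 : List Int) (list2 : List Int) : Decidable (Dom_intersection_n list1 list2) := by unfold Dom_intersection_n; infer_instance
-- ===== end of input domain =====

-- B replaces A's element-by-element membership count with a frequency table of list2
-- summed over its distinct keys that occur in set(list1); alternative decomposition, same cost.


-- ===== PORT A =====
def intersection_n (list1 : List Int) (list2 : List Int) : Int :=
  let element_set : PySem.Set Int := list1.foldl (fun s e => PySem.Set.add s e) PySem.Set.empty
  list2.foldl (fun count candidate =>
    if PySem.Set.contains element_set candidate then count + 1 else count) 0

-- ===== PORT B =====
def intersection_n_alt (list1 : List Int) (list2 : List Int) : Int :=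
  -- freq[x] = freq.get(x, 0) + 1
  let freq : PySem.Dict Int Int := list2.foldl (fun d x => d.modify x 0 (· + 1)) PySem.Dict.empty
  let lookup : PySem.Set Int := PySem.Set.ofList list1
  -- sum(c for k, c in freq.items() if k in lookup)
  freq.items.foldl (fun acc kc => if PySem.Set.contains lookup kc.1 then acc + kc.2 else acc) 0

-- ===== PRECONDITION & SPEC =====
def Spec_intersection_n (list1 : List Int) (list2 : List Int) (out : Int) : Prop := out = intersection_n_alt list1 list2
instance (list1 : List Int) (list2 : List Int) (out : Int) : Decidable (Spec_intersection_n list1 list2 out) := by unfold Spec_intersection_n; infer_instance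

-- ===== CLAIM (what is proved, stated in full; the proofs are below) =====
def Claim_equal_intersection_n : Prop := ∀ (list1 : List Int) (list2 : List Int), Dom_intersection_n list1 list2 → Spec_intersection_n list1 list2 (intersection_n list1 list2)

-- ===== LEMMAS AND PROOFS =====

-- summing an indicator over a nodup list containing x picks out c
lemma sum_indicator_int (ks : List Int) (x : Int) (c : Int)
    (hnd : ks.Nodup) (hx : x ∈ ks) :
    (ks.map (fun k => if k = x then c else 0)).sum = c := by
  induction ks with
  | nil => cases hx
  | cons k ks ih =>
    rcases List.nodup_cons.mp hnd with ⟨hk, hnd'⟩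
    by_cases hkx : k = x
    · subst hkx
      have hz : (ks.map (fun k' => if k' = k then c else 0)).sum = 0 := by
        rw [List.sum_eq_zero]
        intro y hy
        rcases List.mem_map.mp hy with ⟨a, ha, rfl⟩
        simp [show a ≠ k from fun h => hk (h ▸ ha)]
      simp [hz]
    · have hx' : x ∈ ks := by
        rcases List.mem_cons.mp hx with h | h
        · exact absurd h.symm hkx
        · exact h
      simp [hkx, ih hnd' hx']

-- the sum of (filtered) multiplicities over distinct keys is countP
lemma sum_count_distinct (p : Int → Bool) (ks : List Int) (hnd : ks.Nodup) :
    ∀ (l : List Int), (∀ x, x ∈ l → p x = true → x ∈ ks) →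
    (ks.map (fun k => if p k then (l.count k : Int) else 0)).sum = (l.countP p : Int) := by
  intro l
  induction l with
  | nil =>
    intro _
    rw [List.sum_eq_zero]
    · simp
    · intro y hy
      rcases List.mem_map.mp hy with ⟨a, _, rfl⟩
      simp
  | cons x l ih =>
    intro hmem
    have hsplit : (fun k => if p k then ((x :: l).count k : Int) else 0)
        = (fun k => (if p k then (l.count k : Int) else 0) + (if k = x then (if p x then 1 else 0) else 0)) := by
      funext k
      by_cases hkx : k = x
      · subst hkx
        simp [List.count_cons_self]
        split <;> push_cast <;> ring
      · have : (x :: l).count k = l.count k := by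
          simp [List.count_cons, show ¬x = k from fun h => hkx h.symm]
        simp [this, hkx]
    rw [hsplit, PySem.List.sum_map_add_int]
    have hrec := ih (fun y hy hp => hmem y (List.mem_cons_of_mem x hy) hp)
    rw [hrec]
    by_cases hpx : p x = true
    · have hxks : x ∈ ks := hmem x List.mem_cons_self hpx
      rw [sum_indicator_int ks x _ hnd hxks]
      simp [hpx]
    · have hz : (ks.map (fun k => if k = x then (if p x then (1:Int) else 0) else 0)).sum = 0 := by
        rw [List.sum_eq_zero]
        intro y hy
        rcases List.mem_map.mp hy with ⟨a, _, rfl⟩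
        simp [hpx]
      rw [hz]
      simp [hpx]

-- folding an if-add over pairs is the sum of the filtered second components
lemma foldl_if_add_pairs (p : Int → Bool) (l : List (Int × Int)) :
    ∀ (a : Int), l.foldl (fun acc kc => if p kc.1 then acc + kc.2 else acc) a
      = a + (l.map (fun kc => if p kc.1 then kc.2 else 0)).sum := by
  induction l with
  | nil => intro a; simp
  | cons kc l ih =>
    intro a
    by_cases h : p kc.1 = true
    · simp only [List.foldl_cons, List.map_cons, List.sum_cons, h, if_true, ih]
      ring
    · simp only [List.foldl_cons, List.map_cons, List.sum_cons, h, ih]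
      simp

-- ===== VERDICT (by name: the statement is the Claim_ definition above) =====
theorem intersection_n_spec : Claim_equal_intersection_n := by
  intro list1 list2 _
  unfold Spec_intersection_n intersection_n intersection_n_alt
  have hset : list1.foldl (fun s e => PySem.Set.add s e) PySem.Set.empty = PySem.Set.ofList list1 :=
    (PySem.Set.ofList_eq_foldl list1).symm
  have hfreq : list2.foldl (fun d x => d.modify x 0 (· + 1)) PySem.Dict.empty = PySem.Dict.counter list2 :=
    (PySem.Dict.counter_eq_foldl list2).symm
  simp only [hset, hfreq, PySem.Dict.items_counter]
  set p : Int → Bool := fun x => PySem.Set.contains (PySem.Set.ofList list1) x with hp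
  rw [PySem.List.foldl_count_if p list2 0, foldl_if_add_pairs p, List.map_map]
  have hcomp : ((fun kc : Int × Int => if p kc.1 then kc.2 else 0) ∘ (fun k => (k, (list2.count k : Int))))
      = fun k => if p k then (list2.count k : Int) else 0 := by
    funext k; rfl
  rw [hcomp, sum_count_distinct p (PySem.Set.ofList list2) (PySem.Set.nodup_ofList list2)
      list2 (fun x hx _ => (PySem.Set.mem_ofList list2 x).mpr hx)]
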